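-- pv_equiv track=rewrite | github.com/abbyfischler/advcs | sched/teacheravail.py | can_teach
-- ===== SOURCE A (Python) =====
-- def can_teach(teacher, class_name):
--     # DANNY WILL THIS BE GIVEN:
--     can_teach_dict = {}
--
--     #is class name local or regular
--     for class_name in class_name:
--         can_teach_list = []
--         for teacher_name, teacher_classes in teacher.items():
--             if class_name in teacher_classes:
--                 can_teach_list.append(teacher_name)
--                 can_teach_dict[class_name] = can_teach_list
--     return can_teach_dict
-- ===== SOURCE B (Python) =====
-- def can_teach(teacher, class_name):
--     # one-pass inverted index class -> [teachers], then select the requested classes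
--     index = {}
--     for teacher_name, teacher_classes in teacher.items():
--         for c in dict.fromkeys(teacher_classes):
--             index[c] = index.get(c, []) + [teacher_name]
--     result = {}
--     for c in class_name:
--         if c in index:
--             result[c] = index[c]
--     return result
-- ===== Notes on version B (the rewrite author's own statement) =====
-- stated objective: faster
-- what changed: Replaces the nested rescan of all teachers for every requested class by a single pass over teacher.items() that builds an inverted index class->teachers, then selects the requested classes by dict lookup.
import Mathlib
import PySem

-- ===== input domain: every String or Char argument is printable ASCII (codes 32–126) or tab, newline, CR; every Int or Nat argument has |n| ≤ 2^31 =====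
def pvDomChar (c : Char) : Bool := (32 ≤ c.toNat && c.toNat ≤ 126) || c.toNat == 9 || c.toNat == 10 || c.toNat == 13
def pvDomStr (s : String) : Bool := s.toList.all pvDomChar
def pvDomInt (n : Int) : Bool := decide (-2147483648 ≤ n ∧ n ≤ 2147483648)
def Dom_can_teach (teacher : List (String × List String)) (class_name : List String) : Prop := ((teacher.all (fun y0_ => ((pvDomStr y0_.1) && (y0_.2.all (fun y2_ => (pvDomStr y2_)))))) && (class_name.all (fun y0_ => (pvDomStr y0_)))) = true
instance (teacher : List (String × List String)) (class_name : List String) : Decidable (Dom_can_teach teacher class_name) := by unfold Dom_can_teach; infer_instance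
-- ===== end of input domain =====

-- B replaces A's per-class rescan of all teachers by a one-pass inverted index class -> teachers (objective: faster).


-- ===== PORT A =====
-- for each requested class, scan all teachers, growing the list and re-assigning it into the dict at every hit
def can_teach (teacher : List (String × List String)) (class_name : List String) : List (String × List String) :=
  (class_name.foldl (fun d c =>
      (teacher.foldl
          (fun (st : List String × PySem.Dict String (List String)) p =>
            if c ∈ p.2 then (st.1 ++ [p.1], st.2.insert c (st.1 ++ [p.1])) else st)
          ([], d)).2)
    PySem.Dict.empty).items

-- ===== PORT B =====
-- inverted index: one pass over teacher.items(); dict.fromkeys dedups each class list (PySem.List.dedup)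
def canTeachIndex (teacher : List (String × List String)) : PySem.Dict String (List String) :=
  teacher.foldl
    (fun d p => (PySem.List.dedup p.2).foldl (fun d c => d.modify c [] (· ++ [p.1])) d)
    PySem.Dict.empty

-- 'if c in index: result[c] = index[c]' ported as a match on the guarded lookup
def can_teach_alt (teacher : List (String × List String)) (class_name : List String) : List (String × List String) :=
  (class_name.foldl (fun d c =>
      match (canTeachIndex teacher).get? c with
      | some l => d.insert c l
      | none => d)
    PySem.Dict.empty).items

-- ===== PRECONDITION & SPEC =====
def Spec_can_teach (teacher : List (String × List String)) (class_name : List String) (out : List (String × List String)) : Prop := out = can_teach_alt teacher class_name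
instance (teacher : List (String × List String)) (class_name : List String) (out : List (String × List String)) : Decidable (Spec_can_teach teacher class_name out) := by unfold Spec_can_teach; infer_instance

-- ===== CLAIM (what is proved, stated in full; the proofs are below) =====
def Claim_equal_can_teach : Prop := ∀ (teacher : List (String × List String)) (class_name : List String), Dom_can_teach teacher class_name → Spec_can_teach teacher class_name (can_teach teacher class_name)

-- ===== LEMMAS AND PROOFS =====

-- the teachers that can teach class c, in teacher order
def teachersFor (teacher : List (String × List String)) (c : String) : List String :=
  (teacher.filter (fun p => decide (c ∈ p.2))).map Prod.fst

theorem teachersFor_cons (p : String × List String) (ps : List (String × List String)) (c : String) :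
    teachersFor (p :: ps) c = (if c ∈ p.2 then [p.1] else []) ++ teachersFor ps c := by
  by_cases h : c ∈ p.2 <;> simp [teachersFor, List.filter, h]

-- A's inner loop over all teachers, characterized
theorem innerA (teacher : List (String × List String)) (c : String) :
    ∀ (l : List String) (d : PySem.Dict String (List String)),
      teacher.foldl
          (fun (st : List String × PySem.Dict String (List String)) p =>
            if c ∈ p.2 then (st.1 ++ [p.1], st.2.insert c (st.1 ++ [p.1])) else st)
          (l, d)
        = (l ++ teachersFor teacher c,
           if teachersFor teacher c = [] then d else d.insert c (l ++ teachersFor teacher c)) := by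
  induction teacher with
  | nil => intro l d; simp [teachersFor]
  | cons p ps ih =>
    intro l d
    by_cases h : c ∈ p.2
    · simp only [List.foldl_cons, ih, teachersFor_cons, h]
      have hne : p.1 :: teachersFor ps c ≠ [] := by simp
      by_cases hf : teachersFor ps c = []
      · simp [hf]
      · simp [hf, hne, PySem.Dict.insert_insert_self, List.append_assoc]
    · simp only [List.foldl_cons, ih, teachersFor_cons, h]
      simp

theorem nodup_filter_beq (c : String) : ∀ (L : List String), L.Nodup →
    L.filter (fun x => x == c) = if c ∈ L then [c] else [] := by
  intro L hnd
  induction L with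
  | nil => simp
  | cons x xs ih =>
    have hx : x ∉ xs := (List.nodup_cons.mp hnd).1
    have ihx := ih (List.nodup_cons.mp hnd).2
    by_cases hxc : x = c
    · subst hxc
      simp [List.filter, ihx, hx]
    · have hcx : ¬ c = x := fun h => hxc h.symm
      simp [beq_iff_eq, hxc, ihx, hcx]

-- B's inner loop over one teacher's (deduped) class list: effect on getD at c
theorem innerB_getD (cs : List String) (name : String) (d : PySem.Dict String (List String)) (c : String) :
    ((PySem.List.dedup cs).foldl (fun d c' => d.modify c' [] (· ++ [name])) d).getD c []
      = d.getD c [] ++ (if c ∈ cs then [name] else []) := by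
  have hmap : ((PySem.List.dedup cs).map (fun c' => (c', name))).foldl
        (fun d (p : String × String) => d.modify p.1 [] (· ++ [p.2])) d
      = (PySem.List.dedup cs).foldl (fun d c' => d.modify c' [] (· ++ [name])) d := by
    rw [List.foldl_map]
  rw [← hmap, PySem.Dict.getD_foldl_modify_append]
  congr 1
  rw [List.filter_map]
  have : (fun (p : String × String) => p.1 == c) ∘ (fun c' => (c', name)) = fun x => x == c := rfl
  rw [this, nodup_filter_beq c _ (PySem.List.nodup_dedup cs)]
  by_cases h : c ∈ cs
  · simp [h]
  · simp [h]

-- B's index build: getD at c accumulates teachersFor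
theorem build_getD (teacher : List (String × List String)) (c : String) :
    ∀ d : PySem.Dict String (List String),
      (teacher.foldl
          (fun d p => (PySem.List.dedup p.2).foldl (fun d c' => d.modify c' [] (· ++ [p.1])) d)
          d).getD c []
        = d.getD c [] ++ teachersFor teacher c := by
  induction teacher with
  | nil => intro d; simp [teachersFor]
  | cons p ps ih =>
    intro d
    simp only [List.foldl_cons, ih, innerB_getD, teachersFor_cons, List.append_assoc]

-- B's index build: key membership
theorem build_keys (teacher : List (String × List String)) (c : String) :
    ∀ d : PySem.Dict String (List String),
      (c ∈ (teacher.foldl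
          (fun d p => (PySem.List.dedup p.2).foldl (fun d c' => d.modify c' [] (· ++ [p.1])) d)
          d).keys)
        ↔ (c ∈ d.keys ∨ ∃ p ∈ teacher, c ∈ p.2) := by
  induction teacher with
  | nil => intro d; simp
  | cons p ps ih =>
    intro d
    rw [List.foldl_cons, ih, PySem.Dict.keys_foldl_modify, PySem.Set.mem_update]
    simp
    tauto

theorem teachersFor_ne_nil_iff (teacher : List (String × List String)) (c : String) :
    teachersFor teacher c ≠ [] ↔ ∃ p ∈ teacher, c ∈ p.2 := by
  simp [teachersFor, List.filter_eq_nil_iff]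

-- the index lookup, in closed form
theorem index_get? (teacher : List (String × List String)) (c : String) :
    (canTeachIndex teacher).get? c
      = if teachersFor teacher c = [] then none else some (teachersFor teacher c) := by
  by_cases hf : teachersFor teacher c = []
  · rw [if_pos hf, PySem.Dict.get?_eq_none_iff_not_mem_keys, canTeachIndex, build_keys]
    rintro (hk | hex)
    · simp at hk
    · exact (teachersFor_ne_nil_iff teacher c).mpr hex hf
  · rw [if_neg hf]
    have hmem : c ∈ (canTeachIndex teacher).keys := by
      rw [canTeachIndex, build_keys]
      exact Or.inr ((teachersFor_ne_nil_iff teacher c).mp hf)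
    have hgD : (canTeachIndex teacher).getD c [] = teachersFor teacher c := by
      rw [canTeachIndex, build_getD]
      simp
    cases hg : (canTeachIndex teacher).get? c with
    | none =>
      rw [PySem.Dict.get?_eq_none_iff_not_mem_keys] at hg
      exact absurd hmem hg
    | some v =>
      have := PySem.Dict.getD_eq_get?_getD (d := canTeachIndex teacher) (k := c) (d0 := ([] : List String))
      rw [hg] at this
      simp at this
      rw [hgD] at this
      rw [this]

-- ===== VERDICT (by name: the statement is the Claim_ definition above) =====
theorem can_teach_spec : Claim_equal_can_teach := by
  intro teacher class_name _
  unfold Spec_can_teach can_teach can_teach_alt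
  have hstep : (fun (d : PySem.Dict String (List String)) c =>
      (teacher.foldl
          (fun (st : List String × PySem.Dict String (List String)) p =>
            if c ∈ p.2 then (st.1 ++ [p.1], st.2.insert c (st.1 ++ [p.1])) else st)
          ([], d)).2)
      = (fun (d : PySem.Dict String (List String)) c =>
          match (canTeachIndex teacher).get? c with
          | some l => d.insert c l
          | none => d) := by
    funext d c
    rw [innerA, index_get?]
    by_cases hf : teachersFor teacher c = []
    · simp [hf]
    · simp [hf]
  rw [hstep]
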